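-- pv_equiv track=rewrite | github.com/Suah-Cho/Algorithm | Training/HandlingString/pushChar/pushChar.py | solution
-- ===== SOURCE A (Python) =====
-- from collections import deque
--
-- def solution(A, B):
--     A_list = deque(A)
--     B_list = deque(B)
--     for i in range(len(A_list)) :
--         if A_list == B_list :
--             return i
--         A_list.rotate(1)
--
--     return -1
-- ===== SOURCE B (Python) =====
-- def solution(A, B):
--     # rotation index via one substring search in the doubled string,
--     # instead of rotating a deque n times
--     n = len(A)
--     if len(B) != n:
--         return -1
--     if A == B:
--         return 0
--     s = (A + A).rfind(B, 1, 2 * n - 1)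
--     return -1 if s == -1 else n - s
-- ===== Notes on version B (the rewrite author's own statement) =====
-- stated objective: faster
-- what changed: Instead of right-rotating a deque up to n times and comparing whole deques each step, B does one rfind of B inside the doubled string A+A and maps the largest match position s in [1,n) to the rotation count n-s.
-- intended difference: On the single input A='' and B='', A returns -1 because its loop body never runs, while B returns 0, the intended rotation count for two equal (empty) strings. — e.g. on solution("", ""): A returns -1, B returns 0
import Mathlib
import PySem

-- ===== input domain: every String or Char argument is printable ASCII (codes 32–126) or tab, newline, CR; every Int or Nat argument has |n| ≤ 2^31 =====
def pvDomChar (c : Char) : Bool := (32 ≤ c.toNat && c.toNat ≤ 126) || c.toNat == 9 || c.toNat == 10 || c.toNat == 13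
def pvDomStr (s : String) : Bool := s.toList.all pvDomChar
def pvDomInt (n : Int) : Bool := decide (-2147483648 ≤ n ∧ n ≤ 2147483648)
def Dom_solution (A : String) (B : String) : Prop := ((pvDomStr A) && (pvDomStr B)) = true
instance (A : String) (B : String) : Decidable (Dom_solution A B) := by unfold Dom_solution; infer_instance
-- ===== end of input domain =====

-- B replaces A's n deque rotations (each compared element-wise) with one search of B in the doubled string A+A (objective: faster).

-- ===== PORT A =====
-- deque.rotate(1): move the last element to the front (no-op on the empty deque)
def rotA (l : List Char) : List Char :=
  match l.getLast? with
  | none => []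
  | some c => c :: l.dropLast

-- the 'for i in range(len(A_list))' loop with early return: fuel = remaining iterations, i = current index
def loopA (b : List Char) : List Char → Int → Nat → Int
  | _, _, 0 => -1
  | cur, i, Nat.succ fuel => if cur == b then i else loopA b (rotA cur) (i + 1) fuel

def solution (A : String) (B : String) : Int :=
  loopA B.toList A.toList 0 A.toList.length

-- ===== PORT B =====
-- hand-port of (A+A).rfind(B, 1, 2*n-1): largest s in [1, (2*n-1)-len(B)] with (A+A)[s:s+len(B)] == B,
-- else -1; exact because str.rfind returns the largest start position s with start ≤ s ≤ end - len(B)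
def rfindAux (d b : List Char) : Nat → Int
  | 0 => -1
  | Nat.succ s => if (d.drop (s + 1)).take b.length == b then ((s : Int) + 1) else rfindAux d b s

def solution_alt (A : String) (B : String) : Int :=
  let a := A.toList
  let b := B.toList
  let n := a.length
  if b.length ≠ n then -1
  else if a == b then 0
  else
    let s := rfindAux (a ++ a) b (2 * n - 1 - b.length)
    if s == -1 then -1 else (n : Int) - s

-- ===== PRECONDITION & SPEC =====
-- On A = '' and B = '', A returns -1 only because 'range(0)' makes its loop body never run,
-- while B returns 0, the intended rotation count for two equal (empty) strings.
def D_solution (A : String) (B : String) : Prop := A = "" ∧ B = ""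
instance (A : String) (B : String) : Decidable (D_solution A B) := by unfold D_solution; infer_instance

def Spec_solution (A : String) (B : String) (out : Int) : Prop := ¬ D_solution A B → out = solution_alt A B
instance (A : String) (B : String) (out : Int) : Decidable (Spec_solution A B out) := by unfold Spec_solution; infer_instance

def pvDiffWitness_solution : String × String := ("", "")
def pvDiffWitnessOut_solution : Int × Int := (-1, 0)

-- ===== CLAIM (what is proved, stated in full; the proofs are below) =====
def Claim_unchanged_solution : Prop := ∀ (A : String) (B : String), Dom_solution A B → Spec_solution A B (solution A B)
def Claim_changed_solution : Prop := Dom_solution (pvDiffWitness_solution.1) (pvDiffWitness_solution.2) ∧ D_solution (pvDiffWitness_solution.1) (pvDiffWitness_solution.2) ∧ solution (pvDiffWitness_solution.1) (pvDiffWitness_solution.2) = pvDiffWitnessOut_solution.1 ∧ solution_alt (pvDiffWitness_solution.1) (pvDiffWitness_solution.2) = pvDiffWitnessOut_solution.2 ∧ pvDiffWitnessOut_solution.1 ≠ pvDiffWitnessOut_solution.2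
def Claim_exact_solution : Prop := ∀ (A : String) (B : String), Dom_solution A B → D_solution A B → solution A B ≠ solution_alt A B

-- ===== LEMMAS AND PROOFS =====

theorem rotA_length (l : List Char) : (rotA l).length = l.length := by
  match h : l.getLast? with
  | none => simp_all [rotA, List.getLast?_eq_none_iff]
  | some c =>
    have hne : l ≠ [] := by rintro rfl; simp at h
    have : l.length ≠ 0 := by simpa using hne
    simp [rotA, h, List.length_dropLast]
    omega

-- window identity: a length-n slice of the doubled list is a rotation of a
theorem window_eq (a : List Char) (s : Nat) (hs : s ≤ a.length) :
    ((a ++ a).drop s).take a.length = a.drop s ++ a.take s := by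
  rw [List.drop_append_of_le_length hs, List.take_append]
  have h1 : (a.drop s).length = a.length - s := by simp
  rw [List.take_of_length_le (by omega), h1]
  rw [Nat.sub_sub_self hs]

-- one right rotation shifts the window start down by one
theorem rotA_window (a : List Char) (s : Nat) (h1 : s + 1 ≤ a.length) :
    rotA (a.drop (s + 1) ++ a.take (s + 1)) = a.drop s ++ a.take s := by
  have hsl : s < a.length := h1
  have htake : a.take (s + 1) = a.take s ++ [a[s]] := by
    rw [List.take_add_one]; simp [List.getElem?_eq_getElem hsl]
  have hl : a.drop (s + 1) ++ a.take (s + 1) = (a.drop (s + 1) ++ a.take s) ++ [a[s]] := by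
    rw [htake, List.append_assoc]
  rw [hl]
  unfold rotA
  rw [List.getLast?_concat, List.dropLast_concat]
  show a[s] :: (a.drop (s + 1) ++ a.take s) = a.drop s ++ a.take s
  rw [← List.cons_append, ← List.drop_eq_getElem_cons hsl]

-- main correspondence: A's loop with s iterations left (testing windows s, s-1, …, 1)
-- equals B's rfind scan from position s, mapped through n - s
theorem main_corr (a b : List Char) (hb : b.length = a.length) :
    ∀ s : Nat, s ≤ a.length →
      loopA b (a.drop s ++ a.take s) ((a.length : Int) - s) s =
        (if rfindAux (a ++ a) b s == -1 then -1 else (a.length : Int) - rfindAux (a ++ a) b s) := by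
  intro s
  induction s with
  | zero => intro _; simp [loopA, rfindAux]
  | succ s ih =>
    intro hs
    have hw : ((a ++ a).drop (s + 1)).take b.length = a.drop (s + 1) ++ a.take (s + 1) := by
      rw [hb]; exact window_eq a (s + 1) hs
    by_cases hc : a.drop (s + 1) ++ a.take (s + 1) = b
    · have hc' : (a.drop (s + 1) ++ a.take (s + 1) == b) = true := beq_iff_eq.mpr hc
      have h1 : ((s : Int) + 1 == -1) = false := by
        apply beq_false_of_ne; omega
      simp only [loopA, rfindAux, hw, hc', if_true]
      simp only [h1, Bool.false_eq_true, if_false]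
      push_cast; ring
    · have hc' : (a.drop (s + 1) ++ a.take (s + 1) == b) = false := beq_false_of_ne hc
      simp only [loopA, rfindAux, hw, hc', Bool.false_eq_true, if_false]
      rw [rotA_window a s hs]
      rw [show ((a.length : Int) - ↑(s + 1) + 1) = (a.length : Int) - ↑s by push_cast; ring]
      exact ih (by omega)

-- A's loop returns -1 whenever the lengths differ (rotation preserves length)
theorem loopA_ne_length (b : List Char) (cur : List Char) (i : Int) (fuel : Nat)
    (h : cur.length ≠ b.length) : loopA b cur i fuel = -1 := by
  induction fuel generalizing cur i with
  | zero => rfl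
  | succ n ih =>
    have hne : (cur == b) = false := by
      apply beq_false_of_ne; intro he; exact h (by rw [he])
    simp only [loopA, hne, Bool.false_eq_true, if_false]
    exact ih _ _ (by rw [rotA_length]; exact h)

theorem solution_eq_alt (A B : String) (hD : ¬ (A = "" ∧ B = "")) :
    solution A B = solution_alt A B := by
  unfold solution solution_alt
  dsimp only
  set a := A.toList with ha
  set b := B.toList with hbdef
  by_cases hb : b.length = a.length
  · rw [if_neg (by omega)]
    rcases Nat.eq_zero_or_pos a.length with h0 | hpos
    · exfalso
      apply hD
      have ha0 : a = [] := List.length_eq_zero_iff.mp h0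
      have hb0 : b = [] := List.length_eq_zero_iff.mp (by omega)
      constructor
      · have : A.toList = ([] : List Char) := by rw [← ha]; exact ha0
        exact String.toList_eq_nil_iff.mp this
      · have : B.toList = ([] : List Char) := by rw [← hbdef]; exact hb0
        exact String.toList_eq_nil_iff.mp this
    · obtain ⟨m, hm⟩ : ∃ m, a.length = m + 1 := ⟨a.length - 1, by omega⟩
      have key := main_corr a b hb a.length (le_refl _)
      have hwin : a.drop a.length ++ a.take a.length = a := by
        simp
      have hz : (a.length : Int) - (a.length : Nat) = 0 := by ring
      rw [hwin, hz] at key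
      have htop : ((a ++ a).drop (m + 1)).take b.length = a := by
        rw [← hm, hb, List.drop_left, List.take_length]
      rw [hm] at key
      simp only [rfindAux, htop] at key
      by_cases hab : a = b
      · have hab' : (a == b) = true := beq_iff_eq.mpr hab
        rw [if_pos hab']
        rw [hab'] at key
        simp only [if_true] at key
        have : (((m : Int) + 1) == -1) = false := by apply beq_false_of_ne; omega
        rw [this] at key
        simp only [Bool.false_eq_true, if_false] at key
        rw [hm, key]; push_cast; ring
      · have hab' : (a == b) = false := beq_false_of_ne hab
        rw [if_neg (by simp [hab'])]
        rw [hab'] at key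
        simp only [Bool.false_eq_true, if_false] at key
        have hidx : 2 * a.length - 1 - b.length = m := by omega
        rw [hidx, hm]
        exact key
  · rw [if_pos (by omega)]
    exact loopA_ne_length b a 0 a.length (by omega)

-- ===== VERDICT (by name: the statement is the Claim_ definition above) =====
theorem solution_spec : Claim_unchanged_solution := by
  intro A B _ hD
  exact solution_eq_alt A B hD

theorem solution_changed : Claim_changed_solution := by
  unfold Claim_changed_solution; decide

theorem solution_tight : Claim_exact_solution := by
  intro A B _ hD
  obtain ⟨hA, hB⟩ := hD
  subst hA; subst hB; decide
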